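-- pv_equiv track=rewrite | github.com/MichaelAquilina/flake8-spellcheck | flake8_spellcheck/__init__.py | parse_snake_case
-- ===== SOURCE A (Python) =====
-- from string import ascii_lowercase, ascii_uppercase, digits
-- from typing import Any, FrozenSet, Iterable, Iterator, List, Optional, Tuple, Type
--
-- Position = Tuple[int, int]
--
-- def parse_snake_case(name: str, position: Position) -> Iterator[Tuple[Position, str]]:
--     index = position[1]
--     start = index
--     buffer = ""
--     for c in name:
--         index += 1
--         if c in ascii_lowercase or c in digits or c in ascii_uppercase:
--             buffer += c
--         else:
--             if buffer:
--                 yield (position[0], start), buffer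
--
--             buffer = ""
--             start = index
--
--     if buffer:
--         yield (position[0], start), buffer
-- ===== SOURCE B (Python) =====
-- import re
--
-- def parse_snake_case(name, position):
--     for m in re.finditer(r"[a-zA-Z0-9]+", name):
--         yield (position[0], position[1] + m.start()), m.group()
-- ===== Notes on version B (the rewrite author's own statement) =====
-- stated objective: idiomatic
-- what changed: Replaced the manual index/start/buffer state machine with a regex tokenizer: re.finditer over [a-zA-Z0-9]+ yields each match with position[1]+m.start(), removing all buffer and flush bookkeeping; the C regex engine gives a constant-factor speedup over the per-character Python loop.
import Mathlib
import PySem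

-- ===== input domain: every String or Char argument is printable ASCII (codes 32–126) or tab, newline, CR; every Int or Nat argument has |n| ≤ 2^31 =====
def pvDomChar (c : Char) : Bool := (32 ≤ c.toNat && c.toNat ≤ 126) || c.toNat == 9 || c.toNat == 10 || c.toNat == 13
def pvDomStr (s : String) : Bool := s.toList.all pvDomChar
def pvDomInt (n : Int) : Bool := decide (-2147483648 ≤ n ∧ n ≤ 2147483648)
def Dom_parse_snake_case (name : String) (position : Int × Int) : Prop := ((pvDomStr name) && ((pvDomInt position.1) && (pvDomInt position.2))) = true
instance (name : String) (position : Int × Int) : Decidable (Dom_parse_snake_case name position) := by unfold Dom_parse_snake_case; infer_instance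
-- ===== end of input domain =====

-- B replaces A's hand-written index/start/buffer state machine by a regex tokenizer over
-- maximal [a-zA-Z0-9]+ runs (idiomatic; same O(n) cost). Equivalence of return values is proved.

-- Shared character class: Python's `c in ascii_lowercase or c in digits or c in ascii_uppercase`
-- (= the regex class [a-zA-Z0-9]); exact on ASCII.
def pvAlnum (c : Char) : Bool :=
  ('a' ≤ c && c ≤ 'z') || ('0' ≤ c && c ≤ '9') || ('A' ≤ c && c ≤ 'Z')

-- ===== PORT A =====
-- A's loop: for each char bump `index`; alnum chars extend `buffer` (kept as List Char;
-- yielded via String.ofList), others flush `(row,start),buffer` (if nonempty) and reset start := index.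
def pvAGo (cs : List Char) (row : Int) (index start : Int) (buffer : List Char) :
    List ((Int × Int) × String) :=
  match cs with
  | [] => if buffer ≠ [] then [((row, start), String.ofList buffer)] else []
  | c :: rest =>
    if pvAlnum c then
      pvAGo rest row (index + 1) start (buffer ++ [c])
    else
      (if buffer ≠ [] then [((row, start), String.ofList buffer)] else []) ++
        pvAGo rest row (index + 1) (index + 1) []

def parse_snake_case (name : String) (position : Int × Int) : List ((Int × Int) × String) :=
  pvAGo name.toList position.1 position.2 position.2 []

-- ===== PORT B =====
-- B's tokenizer: finditer over maximal alnum runs, recording each match's start offset.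
def pvFind (cs : List Char) (i : Nat) : List (Nat × String) :=
  match cs with
  | [] => []
  | c :: rest =>
    if pvAlnum c then
      let run := c :: rest.takeWhile pvAlnum
      (i, String.ofList run) :: pvFind (rest.dropWhile pvAlnum) (i + run.length)
    else
      pvFind rest (i + 1)
termination_by cs.length
decreasing_by
  · exact Nat.lt_succ_of_le (List.length_dropWhile_le _ _)
  · simp

def parse_snake_case_alt (name : String) (position : Int × Int) : List ((Int × Int) × String) :=
  (pvFind name.toList 0).map (fun p => ((position.1, position.2 + (p.1 : Int)), p.2))

-- ===== PRECONDITION & SPEC =====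
def Spec_parse_snake_case (name : String) (position : Int × Int) (out : List ((Int × Int) × String)) : Prop := out = parse_snake_case_alt name position
instance (name : String) (position : Int × Int) (out : List ((Int × Int) × String)) : Decidable (Spec_parse_snake_case name position out) := by unfold Spec_parse_snake_case; infer_instance

-- ===== CLAIM (what is proved, stated in full; the proofs are below) =====
def Claim_equal_parse_snake_case : Prop := ∀ (name : String) (position : Int × Int), Dom_parse_snake_case name position → Spec_parse_snake_case name position (parse_snake_case name position)

-- ===== LEMMAS AND PROOFS =====

-- Combined invariant, by induction on the remaining characters:
-- (1) with empty buffer and start = index = p2+j, A's loop computes B's token list shifted by p2;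
-- (2) with a nonempty pending buffer, A's loop emits (start, buffer ++ current run) and then
--     continues as in (1) after the run.
theorem pvGo_inv (cs : List Char) :
    (∀ (row p2 : Int) (j : Nat),
       pvAGo cs row (p2 + j) (p2 + j) [] =
         (pvFind cs j).map (fun p => ((row, p2 + (p.1 : Int)), p.2))) ∧
    (∀ (row p2 : Int) (j : Nat) (start : Int) (buf : List Char), buf ≠ [] →
       pvAGo cs row (p2 + j) start buf =
         ((row, start), String.ofList (buf ++ cs.takeWhile pvAlnum)) ::
           (pvFind (cs.dropWhile pvAlnum) (j + (cs.takeWhile pvAlnum).length)).map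
             (fun p => ((row, p2 + (p.1 : Int)), p.2))) := by
  induction cs with
  | nil =>
    constructor
    · intro row p2 j; simp [pvAGo, pvFind]
    · intro row p2 j start buf hb; simp [pvAGo, pvFind, hb]
  | cons c rest ih =>
    obtain ⟨ihE, ihB⟩ := ih
    constructor
    · intro row p2 j
      by_cases hc : pvAlnum c = true
      · have h := ihB row p2 (j + 1) (p2 + j) [c] (by simp)
        push_cast at h
        rw [← add_assoc] at h
        simp only [pvAGo, hc, if_pos, List.nil_append]
        rw [h]
        simp only [pvFind, hc, if_pos, List.map_cons, List.singleton_append]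
        have e : j + 1 + (List.takeWhile pvAlnum rest).length =
            j + (c :: List.takeWhile pvAlnum rest).length := by
          simp [List.length_cons]; omega
        rw [e]
      · have h := ihE row p2 (j + 1)
        push_cast at h
        rw [← add_assoc] at h
        simp only [pvAGo, hc]
        simp only [pvFind, hc]
        simpa using h
    · intro row p2 j start buf hb
      by_cases hc : pvAlnum c = true
      · have h := ihB row p2 (j + 1) start (buf ++ [c]) (by simp)
        push_cast at h
        rw [← add_assoc] at h
        simp only [pvAGo, hc, if_pos]
        rw [h]
        simp only [List.takeWhile_cons_of_pos hc, List.dropWhile_cons_of_pos hc]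
        have e : j + 1 + (List.takeWhile pvAlnum rest).length =
            j + (c :: List.takeWhile pvAlnum rest).length := by
          simp [List.length_cons]; omega
        rw [e]
        simp
      · have h := ihE row p2 (j + 1)
        push_cast at h
        rw [← add_assoc] at h
        simp only [pvAGo, hc]
        rw [h]
        simp only [List.takeWhile_cons_of_neg (by simpa using hc),
          List.dropWhile_cons_of_neg (by simpa using hc), pvFind, hc]
        simp [hb]

-- ===== VERDICT (by name: the statement is the Claim_ definition above) =====
theorem parse_snake_case_spec : Claim_equal_parse_snake_case := by
  intro name position _
  unfold Spec_parse_snake_case parse_snake_case parse_snake_case_alt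
  have h := (pvGo_inv name.toList).1 position.1 position.2 0
  simpa using h
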